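-- pv_equiv track=rewrite | github.com/Bolotin/pyhton_test | exercises/09_functions/09_02.py | generate_trunk_config
-- ===== SOURCE A (Python) =====
-- def generate_trunk_config(interfaces):
--     trunk_template = ['switchport trunk encapsulation dot1q',
--                       'switchport mode trunk',
--                       'switchport trunk native vlan 999',
--                       'switchport trunk allowed vlan']
--     result = []
--     for interface, vlans in interfaces.items():
--         result.append('interface ' + interface)
--         for command in trunk_template:
--             if command.endswith('allowed vlan'):
--                 result.append(command + ' ' + ','.join([str(vlan) for vlan in vlans]))
--             else:
--                 result.append(command)
--     return result
-- ===== SOURCE B (Python) =====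
-- def generate_trunk_config(interfaces):
--     # Staged passes: first build the per-interface header and allowed-vlan lines
--     # as two parallel lists, then flatten the five-line blocks in one comprehension.
--     names = ['interface ' + name for name in interfaces]
--     alloweds = ['switchport trunk allowed vlan ' + ','.join(map(str, vlans))
--                 for vlans in interfaces.values()]
--     return [line
--             for header, allowed in zip(names, alloweds)
--             for line in (header,
--                          'switchport trunk encapsulation dot1q',
--                          'switchport mode trunk',
--                          'switchport trunk native vlan 999',
--                          allowed)]
-- ===== Notes on version B (the rewrite author's own statement) =====
-- stated objective: alternative
-- what changed: Replaced A's single loop with nested template scan and endswith branch by staged passes: two map passes build the header and allowed-vlan line lists, which are zipped and flattened into five-line blocks by one comprehension.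
import Mathlib
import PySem

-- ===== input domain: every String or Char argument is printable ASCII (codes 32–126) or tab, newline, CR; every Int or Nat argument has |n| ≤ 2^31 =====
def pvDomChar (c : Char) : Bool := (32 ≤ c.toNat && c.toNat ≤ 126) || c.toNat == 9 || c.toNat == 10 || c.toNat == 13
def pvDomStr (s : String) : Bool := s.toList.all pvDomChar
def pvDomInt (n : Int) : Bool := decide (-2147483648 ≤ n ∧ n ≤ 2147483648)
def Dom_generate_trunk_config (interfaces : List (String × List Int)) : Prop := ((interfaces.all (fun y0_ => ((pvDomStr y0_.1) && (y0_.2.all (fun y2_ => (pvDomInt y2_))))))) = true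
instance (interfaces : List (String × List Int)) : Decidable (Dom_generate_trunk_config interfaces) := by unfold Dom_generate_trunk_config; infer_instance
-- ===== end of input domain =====

-- B builds the config in staged passes (two map passes producing the header and
-- allowed-vlan line lists, zipped and flattened) instead of A's single loop with an
-- inner template scan and endswith branch; same return value (objective: alternative).

-- ===== PORT A =====
def generate_trunk_config (interfaces : List (String × List Int)) : List String :=
  let trunk_template := ["switchport trunk encapsulation dot1q",
                         "switchport mode trunk",
                         "switchport trunk native vlan 999",
                         "switchport trunk allowed vlan"]
  interfaces.foldl (fun result p =>
    let result := result ++ ["interface " ++ p.1]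
    trunk_template.foldl (fun result command =>
      if PySem.Str.endswith command "allowed vlan" then
        result ++ [command ++ " " ++ PySem.Str.join "," (p.2.map PySem.Int.toStr)]
      else
        result ++ [command]) result) []

-- ===== PORT B =====
def generate_trunk_config_alt (interfaces : List (String × List Int)) : List String :=
  let names := interfaces.map (fun p => "interface " ++ p.1)
  let alloweds := interfaces.map (fun p =>
    "switchport trunk allowed vlan " ++ PySem.Str.join "," (p.2.map PySem.Int.toStr))
  (names.zip alloweds).flatMap (fun q =>
    [q.1,
     "switchport trunk encapsulation dot1q",
     "switchport mode trunk",
     "switchport trunk native vlan 999",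
     q.2])

-- ===== PRECONDITION & SPEC =====
def Spec_generate_trunk_config (interfaces : List (String × List Int)) (out : List String) : Prop := out = generate_trunk_config_alt interfaces
instance (interfaces : List (String × List Int)) (out : List String) : Decidable (Spec_generate_trunk_config interfaces out) := by unfold Spec_generate_trunk_config; infer_instance

-- ===== CLAIM (what is proved, stated in full; the proofs are below) =====
def Claim_equal_generate_trunk_config : Prop := ∀ (interfaces : List (String × List Int)), Dom_generate_trunk_config interfaces → Spec_generate_trunk_config interfaces (generate_trunk_config interfaces)

-- ===== LEMMAS AND PROOFS =====

-- the per-interface block of A's inner template loop equals B's five literal lines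
lemma block_eq (p : String × List Int) (acc : List String) :
    (["switchport trunk encapsulation dot1q",
      "switchport mode trunk",
      "switchport trunk native vlan 999",
      "switchport trunk allowed vlan"].foldl (fun result command =>
        if PySem.Str.endswith command "allowed vlan" then
          result ++ [command ++ " " ++ PySem.Str.join "," (p.2.map PySem.Int.toStr)]
        else
          result ++ [command]) (acc ++ ["interface " ++ p.1])) =
    acc ++ ["interface " ++ p.1,
            "switchport trunk encapsulation dot1q",
            "switchport mode trunk",
            "switchport trunk native vlan 999",
            "switchport trunk allowed vlan " ++ PySem.Str.join "," (p.2.map PySem.Int.toStr)] := by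
  simp only [List.foldl_cons, List.foldl_nil]
  rw [if_pos (by decide), if_neg (by decide), if_neg (by decide), if_neg (by decide),
      show ("switchport trunk allowed vlan" ++ " " : String) = "switchport trunk allowed vlan " from by decide]
  simp

-- A's accumulator loop produces acc ++ the flatMap of per-interface five-line blocks
lemma main_acc (l : List (String × List Int)) : ∀ acc : List String,
    (l.foldl (fun result p =>
      ["switchport trunk encapsulation dot1q",
       "switchport mode trunk",
       "switchport trunk native vlan 999",
       "switchport trunk allowed vlan"].foldl (fun result command =>
        if PySem.Str.endswith command "allowed vlan" then
          result ++ [command ++ " " ++ PySem.Str.join "," (p.2.map PySem.Int.toStr)]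
        else
          result ++ [command]) (result ++ ["interface " ++ p.1])) acc) =
    acc ++ l.flatMap (fun p =>
      ["interface " ++ p.1,
       "switchport trunk encapsulation dot1q",
       "switchport mode trunk",
       "switchport trunk native vlan 999",
       "switchport trunk allowed vlan " ++ PySem.Str.join "," (p.2.map PySem.Int.toStr)]) := by
  induction l with
  | nil => intro acc; simp
  | cons h t ih =>
      intro acc
      rw [List.foldl_cons, block_eq h acc, ih, List.flatMap_cons]
      simp

-- B's zip of two maps over the same list is a single map of the paired lines
lemma zip_map_eq (l : List (String × List Int)) :
    ((l.map (fun p => "interface " ++ p.1)).zip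
      (l.map (fun p => "switchport trunk allowed vlan " ++ PySem.Str.join "," (p.2.map PySem.Int.toStr)))) =
    l.map (fun p => ("interface " ++ p.1,
      "switchport trunk allowed vlan " ++ PySem.Str.join "," (p.2.map PySem.Int.toStr))) := by
  induction l with
  | nil => rfl
  | cons h t ih => simp only [List.map_cons, List.zip_cons_cons, ih]

-- ===== VERDICT (by name: the statement is the Claim_ definition above) =====
theorem generate_trunk_config_spec : Claim_equal_generate_trunk_config := by
  intro l _
  unfold Spec_generate_trunk_config generate_trunk_config generate_trunk_config_alt
  simp only []
  rw [main_acc l [], zip_map_eq l, List.flatMap_map]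
  rfl
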